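-- pv_equiv track=rewrite | github.com/FrancoisBrucker/cours_informatique | docs/src/cours/algorithmie/projet-suite-additive/code/utilitaire.py | coefficient_additif
-- ===== SOURCE A (Python) =====
-- def coefficient_additif(a):
--
--     b = [None]
--
--     for i in range(1, len(a)):
--         j = k = i
--         while j >= 0:
--             if a[i] == a[k] + a[j]:
--                 b.append((k, j))
--                 break
--
--             if k > 0:
--                 k = k - 1
--             else:
--                 j = j - 1
--                 k = j
--
--     return b
-- ===== SOURCE B (Python) =====
-- def coefficient_additif(a):
--     b = [None]
--     for i in range(1, len(a)):
--         ai = a[i]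
--         best = {}          # value -> largest index seen so far
--         found = None
--         for j in range(i + 1):
--             best[a[j]] = j
--             m = best.get(ai - a[j])
--             if m is not None:
--                 found = (m, j)
--         if found is not None:
--             b.append(found)
--     return b
-- ===== Notes on version B (the rewrite author's own statement) =====
-- stated objective: faster
-- what changed: A searches each i with a descending double scan over (k,j) pairs (O(n^3)); B makes one ascending pass per i that maintains a value->latest-index dict and keeps the last matching (max-index, j) pair, which equals A's priority order.
import Mathlib
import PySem

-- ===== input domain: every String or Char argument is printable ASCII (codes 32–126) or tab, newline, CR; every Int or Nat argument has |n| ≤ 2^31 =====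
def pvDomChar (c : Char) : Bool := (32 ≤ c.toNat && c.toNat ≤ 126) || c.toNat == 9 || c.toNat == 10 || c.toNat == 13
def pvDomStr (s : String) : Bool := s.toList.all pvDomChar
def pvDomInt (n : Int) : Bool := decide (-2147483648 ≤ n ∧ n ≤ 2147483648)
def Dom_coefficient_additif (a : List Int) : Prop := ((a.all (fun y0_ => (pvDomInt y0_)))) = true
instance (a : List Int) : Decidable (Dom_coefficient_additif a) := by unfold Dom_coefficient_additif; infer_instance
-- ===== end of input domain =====

-- B replaces A's O(n^3) nested descending scans by one ascending pass per i with a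
-- value -> latest-index dict, keeping the last matching pair (objective: faster, asymptotic).

-- ===== PORT A =====
-- A's while loop with state (k, j): k descends first (first branch of the if), then j
-- steps down and k restarts at j.  Transcribed as the inner k-scan (aScanK, first match
-- wins, k descending) driven by the outer j-descent (aLoopJ).  Indices are always in
-- range (0 ≤ k ≤ j ≤ i < len a), so a[k] is List.getD.
def aScanK (a : List Int) (ai aj : Int) : Nat → Option Nat
  | 0 => if ai = a.getD 0 0 + aj then some 0 else none
  | k+1 => if ai = a.getD (k+1) 0 + aj then some (k+1) else aScanK a ai aj k

def aLoopJ (a : List Int) (ai : Int) : Nat → Option (Nat × Nat)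
  | 0 => (match aScanK a ai (a.getD 0 0) 0 with
          | some k => some (k, 0)
          | none => none)
  | j+1 => (match aScanK a ai (a.getD (j+1) 0) (j+1) with
          | some k => some (k, j+1)
          | none => aLoopJ a ai j)

def coefficient_additif (a : List Int) : List (Option (Int × Int)) :=
  (List.range' 1 (a.length - 1)).foldl
    (fun b i =>
      match aLoopJ a (a.getD i 0) i with
      | some (k, j) => b ++ [some ((k : Int), (j : Int))]
      | none => b) [none]

-- ===== PORT B =====
-- B's inner ascending loop: state = (best : value -> latest index, found : last match).
def bStep (a : List Int) (ai : Int)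
    (st : PySem.Dict Int Int × Option (Int × Int)) (j : Nat) :
    PySem.Dict Int Int × Option (Int × Int) :=
  let best := st.1.insert (a.getD j 0) (j : Int)
  match best.get? (ai - a.getD j 0) with
  | some m => (best, some (m, (j : Int)))
  | none => (best, st.2)

def bInner (a : List Int) (ai : Int) (i : Nat) : Option (Int × Int) :=
  ((List.range (i+1)).foldl (bStep a ai) (PySem.Dict.empty, none)).2

def coefficient_additif_alt (a : List Int) : List (Option (Int × Int)) :=
  (List.range' 1 (a.length - 1)).foldl
    (fun b i =>
      match bInner a (a.getD i 0) i with
      | some p => b ++ [some p]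
      | none => b) [none]

-- ===== PRECONDITION & SPEC =====
def Spec_coefficient_additif (a : List Int) (out : List (Option (Int × Int))) : Prop := out = coefficient_additif_alt a
instance (a : List Int) (out : List (Option (Int × Int))) : Decidable (Spec_coefficient_additif a out) := by unfold Spec_coefficient_additif; infer_instance

-- ===== CLAIM (what is proved, stated in full; the proofs are below) =====
def Claim_equal_coefficient_additif : Prop := ∀ (a : List Int), Dom_coefficient_additif a → Spec_coefficient_additif a (coefficient_additif a)

-- ===== LEMMAS AND PROOFS =====

-- largest index ≤ j holding value v (descending first-match formulation)
def maxIdx (a : List Int) (v : Int) : Nat → Option Nat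
  | 0 => if a.getD 0 0 = v then some 0 else none
  | j+1 => if a.getD (j+1) 0 = v then some (j+1) else maxIdx a v j

theorem aScanK_eq_maxIdx (a : List Int) (ai aj : Int) (k : Nat) :
    aScanK a ai aj k = maxIdx a (ai - aj) k := by
  induction k with
  | zero =>
    simp only [aScanK, maxIdx]
    split_ifs with h1 h2 h2 <;> first | rfl | omega
  | succ k ih =>
    simp only [aScanK, maxIdx, ih]
    split_ifs with h1 h2 h2 <;> first | rfl | omega

-- the first component of B's fold is just the insert loop
theorem bFold_fst (a : List Int) (ai : Int) (l : List Nat)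
    (st : PySem.Dict Int Int × Option (Int × Int)) :
    (l.foldl (bStep a ai) st).1
      = l.foldl (fun d j => d.insert (a.getD j 0) (j : Int)) st.1 := by
  induction l generalizing st with
  | nil => rfl
  | cons j l ih =>
    simp only [List.foldl_cons]
    rw [ih]
    congr 1
    simp only [bStep]
    split <;> rfl

-- the insert loop computes value -> largest index
theorem dict_get_maxIdx (a : List Int) (j : Nat) (v : Int) :
    ((List.range (j+1)).foldl (fun d j => d.insert (a.getD j 0) (j : Int))
        PySem.Dict.empty).get? v = (maxIdx a v j).map (fun k => (k : Int)) := by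
  induction j with
  | zero =>
    simp only [List.range_succ, List.range_zero, List.nil_append, List.foldl_cons,
      List.foldl_nil, maxIdx]
    rw [PySem.Dict.get?_insert]
    split_ifs with h1 h2 h2 <;> simp_all [PySem.Dict.get?_empty]
  | succ j ih =>
    rw [List.range_succ, List.foldl_append, List.foldl_cons, List.foldl_nil,
      PySem.Dict.get?_insert]
    simp only [maxIdx]
    split_ifs with h1 h2 h2 <;> simp_all

-- B's inner loop equals A's inner loop (cast to Int pairs)
theorem bInner_eq (a : List Int) (ai : Int) (i : Nat) :
    bInner a ai i
      = (aLoopJ a ai i).map (fun p => ((p.1 : Int), (p.2 : Int))) := by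
  unfold bInner
  induction i with
  | zero =>
    simp only [List.range_succ, List.range_zero, List.nil_append, List.foldl_cons,
      List.foldl_nil, bStep, aLoopJ, aScanK_eq_maxIdx]
    rw [PySem.Dict.get?_insert]
    simp only [maxIdx]
    split_ifs with h1 h2 h2
    · rfl
    · omega
    · omega
    · simp [PySem.Dict.get?_empty]
  | succ i ih =>
    rw [List.range_succ, List.foldl_append, List.foldl_cons, List.foldl_nil]
    simp only [bStep]
    have hfst : ((List.range (i+1)).foldl (bStep a ai) (PySem.Dict.empty, none)).1.insert
        (a.getD (i+1) 0) ((i+1 : Nat) : Int)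
        = (List.range (i+1+1)).foldl (fun d j => d.insert (a.getD j 0) (j : Int))
            PySem.Dict.empty := by
      rw [bFold_fst]
      conv_rhs => rw [List.range_succ, List.foldl_append, List.foldl_cons, List.foldl_nil]
    rw [hfst, dict_get_maxIdx]
    simp only [aLoopJ, aScanK_eq_maxIdx]
    cases h : maxIdx a (ai - a.getD (i+1) 0) (i+1) with
    | some k => simp
    | none => simpa using ih

-- ===== VERDICT (by name: the statement is the Claim_ definition above) =====
theorem coefficient_additif_spec : Claim_equal_coefficient_additif := by
  intro a _
  unfold Spec_coefficient_additif coefficient_additif coefficient_additif_alt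
  have hfun : (fun (b : List (Option (Int × Int))) (i : Nat) =>
      match aLoopJ a (a.getD i 0) i with
      | some (k, j) => b ++ [some ((k : Int), (j : Int))]
      | none => b)
      = (fun (b : List (Option (Int × Int))) (i : Nat) =>
      match bInner a (a.getD i 0) i with
      | some p => b ++ [some p]
      | none => b) := by
    funext b i
    rw [bInner_eq]
    cases aLoopJ a (a.getD i 0) i with
    | none => rfl
    | some p => rfl
  rw [hfun]
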